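-- pv_equiv track=rewrite | github.com/linhdvu14/cp-sols | sols/CodeForces/1579_d3/B_Shifting_Sort.py | solve
-- ===== SOURCE A (Python) =====
-- def solve(nums, N):
--     res = []
--     for i in range(N):
--         mni, mnv = i, nums[i]
--         for j in range(i+1, N):
--             if nums[j] < mnv:
--                 mni, mnv = j, nums[j]
--         if mni==i: continue
--         res.append((i, mni, mni-i))
--         nums[i:mni+1] = [nums[mni]] + nums[i:mni]
--     return res
-- ===== SOURCE B (Python) =====
-- def solve(nums, N):
--     # Stable selection sort replayed without mutating nums: the picks, in order,
--     # are exactly the indices sorted by (value, index); the source position of the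
--     # i-th pick is i plus the number of still-unpicked indices before it.
--     order = sorted(range(N), key=lambda j: (nums[j], j))
--     alive = [True] * N
--     res = []
--     for i, j in enumerate(order):
--         pos = i + sum(alive[:j])
--         if pos != i:
--             res.append((i, pos, pos - i))
--         alive[j] = False
--     return res
-- ===== Notes on version B (the rewrite author's own statement) =====
-- stated objective: alternative
-- what changed: Replaces the in-place selection-sort simulation (inner min-scan plus slice rotation of nums) by a non-mutating replay: sort the indices once by (value, index) and recover each pick's current position by counting still-unpicked smaller indices.
import Mathlib
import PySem

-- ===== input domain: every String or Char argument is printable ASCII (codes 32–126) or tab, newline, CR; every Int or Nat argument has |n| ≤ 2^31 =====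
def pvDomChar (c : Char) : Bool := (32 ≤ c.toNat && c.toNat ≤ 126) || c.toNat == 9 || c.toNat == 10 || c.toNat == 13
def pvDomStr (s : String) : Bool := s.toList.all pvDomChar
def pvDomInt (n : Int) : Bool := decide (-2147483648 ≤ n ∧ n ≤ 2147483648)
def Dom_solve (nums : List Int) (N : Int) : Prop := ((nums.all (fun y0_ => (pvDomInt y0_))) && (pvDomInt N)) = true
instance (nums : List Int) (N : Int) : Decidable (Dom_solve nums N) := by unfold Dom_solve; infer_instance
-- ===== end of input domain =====

-- B records the same shift operations as A but without mutating nums (A rewrites its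
-- argument in place; the equivalence proved here is about the return value):
-- B sorts the indices once by (value, index) and counts remaining smaller indices.

-- ===== PORT A =====
-- inner loop: for j in range(i+1, N): if nums[j] < mnv: mni, mnv = j, nums[j]
def solveInnerA (nums : List Int) (mni mnv j N : Int) : Int × Int :=
  if _h : j < N then
    if PySem.List.pyGetD nums j 0 < mnv then
      solveInnerA nums j (PySem.List.pyGetD nums j 0) (j + 1) N
    else
      solveInnerA nums mni mnv (j + 1) N
  else (mni, mnv)
termination_by (N - j).toNat
decreasing_by all_goals omega

-- outer loop: state = (nums, res); the slice assignment
-- nums[i:mni+1] = [nums[mni]] + nums[i:mni] replaces positions i..mni by a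
-- same-length list, i.e. nums = nums[:i] ++ ([nums[mni]] + nums[i:mni]) ++ nums[mni+1:]
def solveOuterA (nums : List Int) (res : List (Int × Int × Int)) (i N : Int) :
    List (Int × Int × Int) :=
  if _h : i < N then
    let mm := solveInnerA nums i (PySem.List.pyGetD nums i 0) (i + 1) N
    if mm.1 = i then solveOuterA nums res (i + 1) N
    else
      let nums' := List.take i.toNat nums ++
        ([PySem.List.pyGetD nums mm.1 0] ++ PySem.List.slice nums (some i) (some mm.1)) ++
        List.drop (mm.1 + 1).toNat nums
      solveOuterA nums' (res ++ [(i, mm.1, mm.1 - i)]) (i + 1) N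
  else res
termination_by (N - i).toNat
decreasing_by all_goals omega

def solve (nums : List Int) (N : Int) : List (Int × Int × Int) :=
  solveOuterA nums [] 0 N

-- ===== PORT B =====
-- order = sorted(range(N), key=lambda j: (nums[j], j)); alive = [True]*N
-- ([True]*N is [] for negative N, hence replicate N.toNat); sum(alive[:j]) is the
-- count of True in the slice; alive[j] = False with j from range(N), so j ≥ 0 and
-- j.toNat is exact.
def solve_alt (nums : List Int) (N : Int) : List (Int × Int × Int) :=
  let order := PySem.List.sorted2 (PySem.List.pyRange 0 N 1)
    (fun j => PySem.List.pyGetD nums j 0) (fun j => j)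
  ((PySem.List.enumerate order 0).foldl
    (fun (st : List Bool × List (Int × Int × Int)) ij =>
      let pos : Int := ij.1 +
        (((PySem.List.slice st.1 none (some ij.2)).countP (fun b => b = true) : Nat) : Int)
      let res' := if pos ≠ ij.1 then st.2 ++ [(ij.1, pos, pos - ij.1)] else st.2
      (st.1.set ij.2.toNat false, res'))
    (List.replicate N.toNat true, [])).2

-- ===== PRECONDITION & SPEC =====
-- Pre_ excludes exactly the inputs where Python A raises IndexError: N > len(nums).
def Pre_solve (nums : List Int) (N : Int) : Prop := N ≤ (nums.length : Int)
instance (nums : List Int) (N : Int) : Decidable (Pre_solve nums N) := by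
  unfold Pre_solve; infer_instance

def pvWitness_solve : List Int × Int := ([3, 1, 2], 3)

def Spec_solve (nums : List Int) (N : Int) (out : List (Int × Int × Int)) : Prop :=
  out = solve_alt nums N
instance (nums : List Int) (N : Int) (out : List (Int × Int × Int)) :
    Decidable (Spec_solve nums N out) := by unfold Spec_solve; infer_instance

-- ===== CLAIM (what is proved, stated in full; the proofs are below) =====
def Claim_equal_solve : Prop := ∀ (nums : List Int) (N : Int),
  Dom_solve nums N → Pre_solve nums N → Spec_solve nums N (solve nums N)

-- ===== LEMMAS AND PROOFS =====

-- value of nums at (Int) index j, as both ports read it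
def valAt (nums : List Int) (j : Int) : Int := PySem.List.pyGetD nums j 0

-- A's inner scan, abstracted: first strict improvement over running minimum
def pickL (mni mnv off : Int) : List Int → Int × Int
  | [] => (mni, mnv)
  | w :: ws => if w < mnv then pickL off w (off + 1) ws else pickL mni mnv (off + 1) ws

-- position of the first minimum of (v :: rest)
def fmPos (v : Int) (rest : List Int) : Nat := (pickL 0 v 1 rest).1.toNat

lemma pickL_spec (vs : List Int) : ∀ (mni mnv off : Int),
    (pickL mni mnv off vs = (mni, mnv) ∧ ∀ w ∈ vs, mnv ≤ w) ∨
    (∃ k : Nat, k < vs.length ∧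
      pickL mni mnv off vs = (off + (k : Int), vs.getD k 0) ∧
      vs.getD k 0 < mnv ∧
      (∀ q : Nat, q < vs.length → vs.getD k 0 ≤ vs.getD q 0) ∧
      (∀ l : Nat, l < k → vs.getD k 0 < vs.getD l 0)) := by
  induction vs with
  | nil => intro mni mnv off; left; exact ⟨rfl, by simp⟩
  | cons w ws ih =>
    intro mni mnv off
    by_cases hw : w < mnv
    · right
      rcases ih off w (off + 1) with ⟨heq, hall⟩ | ⟨k, hk, heq, hlt, hmin, hfirst⟩
      · refine ⟨0, by simp, by simp [pickL, hw, heq], by simpa using hw, ?_, by omega⟩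
        intro q hq
        match q with
        | 0 => simp
        | q + 1 =>
          simp only [List.getD_cons_zero, List.getD_cons_succ]
          have hq' : q < ws.length := by simpa using hq
          have : ws.getD q 0 ∈ ws := by
            rw [List.getD_eq_getElem _ _ hq']; exact List.getElem_mem hq'
          exact hall _ this
      · refine ⟨k + 1, by simpa using Nat.succ_lt_succ hk, ?_, ?_, ?_, ?_⟩
        · simp only [pickL, if_pos hw, heq, List.getD_cons_succ]
          rw [Prod.mk.injEq]
          refine ⟨by push_cast; ring, rfl⟩
        · simp only [List.getD_cons_succ]; omega
        · intro q hq
          match q with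
          | 0 => simp only [List.getD_cons_succ, List.getD_cons_zero]; omega
          | q + 1 =>
            simp only [List.getD_cons_succ]
            exact hmin q (by simpa using hq)
        · intro l hl
          match l with
          | 0 => simp only [List.getD_cons_succ, List.getD_cons_zero]; omega
          | l + 1 =>
            simp only [List.getD_cons_succ]
            exact hfirst l (by omega)
    · rcases ih mni mnv (off + 1) with ⟨heq, hall⟩ | ⟨k, hk, heq, hlt, hmin, hfirst⟩
      · left
        refine ⟨by simp [pickL, hw, heq], ?_⟩
        intro w' hw'
        rcases List.mem_cons.mp hw' with h | h
        · omega
        · exact hall _ h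
      · right
        refine ⟨k + 1, by simpa using Nat.succ_lt_succ hk, ?_, ?_, ?_, ?_⟩
        · simp only [pickL, if_neg hw, heq, List.getD_cons_succ]
          rw [Prod.mk.injEq]
          refine ⟨by push_cast; ring, rfl⟩
        · simp only [List.getD_cons_succ]; omega
        · intro q hq
          match q with
          | 0 => simp only [List.getD_cons_succ, List.getD_cons_zero]; omega
          | q + 1 =>
            simp only [List.getD_cons_succ]
            exact hmin q (by simpa using hq)
        · intro l hl
          match l with
          | 0 => simp only [List.getD_cons_succ, List.getD_cons_zero]; omega
          | l + 1 =>
            simp only [List.getD_cons_succ]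
            exact hfirst l (by omega)

lemma pickL_shift (vs : List Int) : ∀ (mni mnv off c : Int),
    pickL (mni + c) mnv (off + c) vs =
      ((pickL mni mnv off vs).1 + c, (pickL mni mnv off vs).2) := by
  induction vs with
  | nil => intro mni mnv off c; rfl
  | cons w ws ih =>
    intro mni mnv off c
    by_cases hw : w < mnv
    · simp only [pickL, if_pos hw]
      have : off + c + 1 = (off + 1) + c := by ring
      rw [this, ih off w (off + 1) c]
    · simp only [pickL, if_neg hw]
      have : off + c + 1 = (off + 1) + c := by ring
      rw [this, ih mni mnv (off + 1) c]

lemma fmPos_int (v : Int) (rest : List Int) :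
    (pickL 0 v 1 rest).1 = ((fmPos v rest : Nat) : Int) := by
  rcases pickL_spec rest 0 v 1 with ⟨heq, _⟩ | ⟨k, _, heq, _, _, _⟩ <;>
    simp [fmPos, heq] <;> omega

lemma fmPos_lt (v : Int) (rest : List Int) : fmPos v rest < (v :: rest).length := by
  rcases pickL_spec rest 0 v 1 with ⟨heq, _⟩ | ⟨k, hk, heq, _, _, _⟩ <;>
    simp [fmPos, heq] <;> omega

lemma fmPos_min (v : Int) (rest : List Int) :
    ∀ q : Nat, q < (v :: rest).length →
      (v :: rest).getD (fmPos v rest) 0 ≤ (v :: rest).getD q 0 := by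
  intro q hq
  rcases pickL_spec rest 0 v 1 with ⟨heq, hall⟩ | ⟨k, hk, heq, hlt, hmin, _⟩
  · have hp : fmPos v rest = 0 := by simp [fmPos, heq]
    rw [hp]
    match q with
    | 0 => simp
    | q + 1 =>
      simp only [List.getD_cons_zero, List.getD_cons_succ]
      have hq' : q < rest.length := by simpa using hq
      have : rest.getD q 0 ∈ rest := by
        rw [List.getD_eq_getElem _ _ hq']; exact List.getElem_mem hq'
      exact hall _ this
  · have hp : fmPos v rest = k + 1 := by simp [fmPos, heq]; omega
    rw [hp]
    match q with
    | 0 => simp only [List.getD_cons_succ, List.getD_cons_zero]; omega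
    | q + 1 =>
      simp only [List.getD_cons_succ]
      exact hmin q (by simpa using hq)

lemma fmPos_first (v : Int) (rest : List Int) :
    ∀ l : Nat, l < fmPos v rest →
      (v :: rest).getD (fmPos v rest) 0 < (v :: rest).getD l 0 := by
  intro l hl
  rcases pickL_spec rest 0 v 1 with ⟨heq, hall⟩ | ⟨k, hk, heq, hlt, _, hfirst⟩
  · have hp : fmPos v rest = 0 := by simp [fmPos, heq]
    omega
  · have hp : fmPos v rest = k + 1 := by simp [fmPos, heq]; omega
    rw [hp] at hl ⊢
    match l with
    | 0 => simp only [List.getD_cons_succ, List.getD_cons_zero]; omega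
    | l + 1 =>
      simp only [List.getD_cons_succ]
      exact hfirst l (by omega)

lemma fmPos_unique (v : Int) (rest : List Int) (q : Nat)
    (hq : q < (v :: rest).length)
    (hmin : ∀ r : Nat, r < (v :: rest).length →
      (v :: rest).getD q 0 ≤ (v :: rest).getD r 0)
    (hfirst : ∀ l : Nat, l < q → (v :: rest).getD q 0 < (v :: rest).getD l 0) :
    fmPos v rest = q := by
  rcases Nat.lt_trichotomy (fmPos v rest) q with h | h | h
  · have h1 := hfirst _ h
    have h2 := fmPos_min v rest q hq
    omega
  · exact h
  · have h1 := fmPos_first v rest q h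
    have h2 := hmin _ (fmPos_lt v rest)
    omega

-- the common reference: selection-sort shift operations on a value list
def refRec : List Int → Int → List (Int × Int × Int)
  | [], _ => []
  | v :: rest, i =>
    let p := fmPos v rest
    (if p = 0 then [] else [(i, i + (p : Int), (p : Int))]) ++
      refRec ((v :: rest).eraseIdx p) (i + 1)
termination_by vs _ => vs.length
decreasing_by
  have h1 := fmPos_lt v rest
  rw [List.length_eraseIdx_of_lt h1]
  omega

-- ===== A-side =====

lemma slice_cons_of_lt (nums : List Int) (j N : Int) (h0 : 0 ≤ j) (hjN : j < N)
    (hN : N ≤ (nums.length : Int)) :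
    PySem.List.slice nums (some j) (some N) =
      nums[j.toNat]'(by omega) :: PySem.List.slice nums (some (j + 1)) (some N) := by
  have hjl : j.toNat < nums.length := by omega
  rw [PySem.List.slice_toNat _ h0 (by omega), PySem.List.slice_toNat _ (by omega) (by omega)]
  rw [List.drop_eq_getElem_cons hjl]
  have h1 : N.toNat - j.toNat = (N.toNat - (j + 1).toNat) + 1 := by omega
  have h2 : (j + 1).toNat = j.toNat + 1 := by omega
  rw [h1, h2, List.take_succ_cons]

lemma innerA_eq (nums : List Int) (N : Int) (h0N : 0 ≤ N)
    (hN : N ≤ (nums.length : Int)) :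
    ∀ (j mni mnv : Int), 0 ≤ j →
      solveInnerA nums mni mnv j N =
        pickL mni mnv j (PySem.List.slice nums (some j) (some N)) := by
  have main : ∀ (fuel : Nat) (j mni mnv : Int), (N - j).toNat ≤ fuel → 0 ≤ j →
      solveInnerA nums mni mnv j N =
        pickL mni mnv j (PySem.List.slice nums (some j) (some N)) := by
    intro fuel
    induction fuel with
    | zero =>
      intro j mni mnv hf hj
      have hjN : ¬ j < N := by omega
      rw [solveInnerA]
      have hsl : PySem.List.slice nums (some j) (some N) = [] := by
        rw [PySem.List.slice_toNat _ hj h0N]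
        have : N.toNat - j.toNat = 0 := by omega
        rw [this, List.take_zero]
      simp [hjN, hsl, pickL]
    | succ fuel ih =>
      intro j mni mnv hf hj
      rw [solveInnerA]
      by_cases hjN : j < N
      · rw [slice_cons_of_lt nums j N hj hjN hN]
        have hjl : j.toNat < nums.length := by omega
        have hget : PySem.List.pyGetD nums j 0 = nums[j.toNat]'hjl :=
          PySem.List.pyGetD_eq_getElem nums 0 hj (by omega)
        rw [dif_pos hjN]
        simp only [hget, pickL]
        by_cases hv : nums[j.toNat]'hjl < mnv
        · rw [if_pos hv, if_pos hv, ih (j + 1) j _ (by omega) (by omega)]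
        · rw [if_neg hv, if_neg hv, ih (j + 1) mni mnv (by omega) (by omega)]
      · have hsl : PySem.List.slice nums (some j) (some N) = [] := by
          rw [PySem.List.slice_toNat _ hj h0N]
          have : N.toNat - j.toNat = 0 := by omega
          rw [this, List.take_zero]
        simp [hjN, hsl, pickL]
  intro j mni mnv hj
  exact main (N - j).toNat j mni mnv le_rfl hj

lemma getD_prefix (done mid tail : List Int) (p : Nat) (hp : p < mid.length) :
    PySem.List.pyGetD (done ++ mid ++ tail) ((done.length : Int) + (p : Int)) 0 =
      mid.getD p 0 := by
  have hlen : ((done ++ mid ++ tail).length : Int) =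
      (done.length : Int) + mid.length + tail.length := by push_cast; simp; ring
  rw [PySem.List.pyGetD_eq_getElem _ 0 (by omega) (by omega)]
  have ht : ((done.length : Int) + (p : Int)).toNat = done.length + p := by omega
  rw [List.getD_eq_getElem _ _ hp]
  simp only [ht, List.append_assoc]
  rw [List.getElem_append_right (by omega)]
  rw [List.getElem_append_left (by omega)]
  congr 1
  omega

lemma outerA_eq :
    ∀ (vs done tail : List Int) (res : List (Int × Int × Int)),
      solveOuterA (done ++ vs ++ tail) res ((done.length : Int))
          ((done.length : Int) + (vs.length : Int)) =
        res ++ refRec vs (done.length : Int) := by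
  have main : ∀ (n : Nat) (vs done tail : List Int) (res : List (Int × Int × Int)),
      vs.length = n →
      solveOuterA (done ++ vs ++ tail) res ((done.length : Int))
          ((done.length : Int) + (vs.length : Int)) =
        res ++ refRec vs (done.length : Int) := by
    intro n
    induction n using Nat.strong_induction_on with
    | _ n ih =>
      intro vs done tail res hn
      match vs with
      | [] =>
        rw [solveOuterA, dif_neg (by simp), refRec]
        simp
      | v :: rest =>
        have hiN : (done.length : Int) <
            (done.length : Int) + ((v :: rest).length : Int) := by simp only [List.length_cons, List.length_append, List.length_nil]; push_cast; omega
        have hshape : done ++ (v :: rest) ++ tail = done ++ ((v :: rest) ++ tail) := by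
          simp
        have hlen : ((done ++ (v :: rest) ++ tail).length : Int) =
            (done.length : Int) + ((rest.length : Int) + 1) + (tail.length : Int) := by
          push_cast; simp; ring
        rw [solveOuterA, dif_pos hiN]
        have hget : PySem.List.pyGetD (done ++ (v :: rest) ++ tail)
            ((done.length : Int)) 0 = v := by
          have h0 := getD_prefix done (v :: rest) tail 0 (by simp)
          simpa using h0
        have hsl : PySem.List.slice (done ++ (v :: rest) ++ tail)
            (some ((done.length : Int) + 1))
            (some ((done.length : Int) + ((v :: rest).length : Int))) = rest := by
          rw [PySem.List.slice_toNat _ (by omega) (by simp; omega)]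
          have h2 : ((done.length : Int) + ((v :: rest).length : Int)).toNat -
              ((done.length : Int) + 1).toNat = rest.length := by simp only [List.length_cons, List.length_append, List.length_nil]; omega
          have h1 : ((done.length : Int) + 1).toNat = (done ++ [v]).length := by
            simp only [List.length_cons, List.length_append, List.length_nil]; omega
          rw [h2, h1, show done ++ (v :: rest) ++ tail =
            (done ++ [v]) ++ (rest ++ tail) by simp]
          rw [List.drop_left' rfl, List.take_left' rfl]
        have hinner : solveInnerA (done ++ (v :: rest) ++ tail) (done.length : Int)
            (PySem.List.pyGetD (done ++ (v :: rest) ++ tail) ((done.length : Int)) 0)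
            ((done.length : Int) + 1)
            ((done.length : Int) + ((v :: rest).length : Int)) =
            (((fmPos v rest : Nat) : Int) + (done.length : Int),
              (pickL 0 v 1 rest).2) := by
          rw [hget, innerA_eq _ _ (by simp only [List.length_cons, List.length_append, List.length_nil]; push_cast; omega) (by rw [hlen]; simp only [List.length_cons, List.length_append, List.length_nil]; push_cast; omega)
              _ _ v (by omega), hsl]
          have hs := pickL_shift rest 0 v 1 (done.length : Int)
          rw [show (0 : Int) + (done.length : Int) = (done.length : Int) by ring,
              show (1 : Int) + (done.length : Int) = (done.length : Int) + 1 by ring]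
            at hs
          rw [hs, fmPos_int]
        simp only [hinner]
        have hplt : fmPos v rest < rest.length + 1 := by
          have := fmPos_lt v rest; simpa using this
        by_cases hp0 : fmPos v rest = 0
        · rw [if_pos (by rw [hp0]; simp)]
          have hih := ih rest.length (by simp only [List.length_cons, List.length_append, List.length_nil] at hn; omega) rest (done ++ [v]) tail res rfl
          rw [show ((done ++ [v]).length : Int) = (done.length : Int) + 1 by simp]
            at hih
          rw [show (done ++ [v]) ++ rest ++ tail = done ++ (v :: rest) ++ tail by simp]
            at hih
          rw [show (done.length : Int) + 1 + (rest.length : Int) =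
            (done.length : Int) + ((v :: rest).length : Int) by simp; ring] at hih
          rw [hih, refRec]
          simp [hp0]
        · rw [if_neg (by intro h; apply hp0; omega)]
          set p : Nat := fmPos v rest with hpdef
          set D : Int := (done.length : Int) with hD
          set nums : List Int := done ++ (v :: rest) ++ tail with hnums
          set m : Int := (v :: rest).getD p 0 with hm
          have hplen : p < (v :: rest).length := by simpa using hplt
          have hple : p ≤ (v :: rest).length := by omega
          have hshape2 : nums = done ++ ((v :: rest) ++ tail) := by
            rw [hnums]; simp
          have htake : List.take D.toNat nums = done := by
            rw [show D.toNat = done.length by omega, hshape2, List.take_left' rfl]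
          have hgetp : PySem.List.pyGetD nums ((p : Int) + D) 0 = m := by
            rw [show ((p : Int) + D) = D + (p : Int) by ring, hnums, hD]
            exact getD_prefix done (v :: rest) tail p hplen
          have hslice2 : PySem.List.slice nums (some D) (some ((p : Int) + D)) =
              (v :: rest).take p := by
            rw [PySem.List.slice_toNat _ (by omega) (by omega)]
            rw [show ((p : Int) + D).toNat - D.toNat = p by omega,
              show D.toNat = done.length by omega, hshape2,
              List.drop_left' rfl, List.take_append_of_le_length hple]
          have hdrop : List.drop ((p : Int) + D + 1).toNat nums =
              (v :: rest).drop (p + 1) ++ tail := by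
            rw [show ((p : Int) + D + 1).toNat = done.length + (p + 1) by omega,
              hshape2, List.drop_append]
            rw [show done.length + (p + 1) - done.length = p + 1 by omega,
              List.drop_of_length_le (by omega), List.drop_append]
            have hz : p + 1 - ((v :: rest) : List Int).length = 0 := by
              simp only [List.length_cons]; omega
            rw [hz]
            simp
          rw [htake, hgetp, hslice2, hdrop]
          have hresh : done ++ ([m] ++ (v :: rest).take p) ++
              ((v :: rest).drop (p + 1) ++ tail) =
              (done ++ [m]) ++ (v :: rest).eraseIdx p ++ tail := by
            rw [List.eraseIdx_eq_take_drop_succ]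
            simp
          rw [hresh]
          have herlen : ((v :: rest).eraseIdx p).length = rest.length := by
            rw [List.length_eraseIdx_of_lt hplen]
            simp
          have hih := ih ((v :: rest).eraseIdx p).length
              (by rw [herlen]; simp only [List.length_cons, List.length_append, List.length_nil] at hn; omega)
              ((v :: rest).eraseIdx p) (done ++ [m]) tail
              (res ++ [(D, (p : Int) + D, (p : Int) + D - D)]) rfl
          rw [show ((done ++ [m]).length : Int) = D + 1 by simp [hD]] at hih
          rw [show D + 1 + (((v :: rest).eraseIdx p).length : Int) =
              D + ((v :: rest).length : Int) by rw [herlen]; simp; ring] at hih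
          rw [hih]
          conv_rhs => rw [refRec]
          rw [if_neg hp0]
          simp only [List.append_assoc, List.cons_append, List.nil_append]
          rw [show (p : Int) + D - D = (p : Int) by ring,
            show (p : Int) + D = D + (p : Int) by ring]
  intro vs done tail res
  exact main vs.length vs done tail res rfl

lemma solveA_eq_ref (nums : List Int) (N : Int) (h0 : 0 ≤ N)
    (hN : N ≤ (nums.length : Int)) :
    solve nums N = refRec (nums.take N.toNat) 0 := by
  have h := outerA_eq (nums.take N.toNat) [] (nums.drop N.toNat) []
  simp only [List.nil_append, List.length_nil, Nat.cast_zero, zero_add] at h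
  rw [List.take_append_drop] at h
  have hlen : (nums.take N.toNat).length = N.toNat := by
    rw [List.length_take]; omega
  rw [hlen, Int.toNat_of_nonneg h0] at h
  exact h

-- ===== B-side =====

-- indices of the still-alive cells, in increasing order, starting at base k
def aliveIdx : List Bool → Int → List Int
  | [], _ => []
  | b :: bs, k => (if b then [k] else []) ++ aliveIdx bs (k + 1)

-- strict (value, index) lexicographic order on indices
def ltIdx (nums : List Int) (a b : Int) : Prop :=
  valAt nums a < valAt nums b ∨ (valAt nums a = valAt nums b ∧ a < b)

-- the comparison sorted2 uses, specialised to B's keys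
def bfB (nums : List Int) (a b : Int) : Bool :=
  decide (valAt nums a < valAt nums b) ||
    (!decide (valAt nums b < valAt nums a) && decide (a < b))

lemma aliveIdx_append (xs ys : List Bool) : ∀ k : Int,
    aliveIdx (xs ++ ys) k = aliveIdx xs k ++ aliveIdx ys (k + (xs.length : Int)) := by
  induction xs with
  | nil => intro k; simp [aliveIdx]
  | cons b bs ih =>
    intro k
    have harg : k + ((b :: bs).length : Int) = (k + 1) + (bs.length : Int) := by
      simp only [List.length_cons]; push_cast; ring
    simp only [List.cons_append, aliveIdx, ih (k + 1), harg, List.append_assoc]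

lemma aliveIdx_length_bound (xs : List Bool) : ∀ (k : Int), ∀ j ∈ aliveIdx xs k,
    k ≤ j ∧ j < k + (xs.length : Int) := by
  induction xs with
  | nil => intro k j hj; simp [aliveIdx] at hj
  | cons b bs ih =>
    intro k j hj
    simp only [aliveIdx, List.mem_append] at hj
    have hlen : ((b :: bs).length : Int) = (bs.length : Int) + 1 := by
      simp only [List.length_cons]; push_cast; ring
    rcases hj with hj | hj
    · rcases Bool.eq_false_or_eq_true b with hb | hb <;> simp [hb] at hj
      rw [hj, hlen]
      constructor <;> omega
    · have := ih (k + 1) j hj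
      rw [hlen]
      constructor <;> omega

lemma countTrue_eq_aliveIdx_length (xs : List Bool) : ∀ k : Int,
    xs.countP (fun b => b = true) = (aliveIdx xs k).length := by
  induction xs with
  | nil => intro k; simp [aliveIdx]
  | cons b bs ih =>
    intro k
    have H := ih (k + 1)
    cases b <;> simp [aliveIdx, List.countP_cons] at H ⊢ <;> omega

lemma mem_aliveIdx_split (xs : List Bool) : ∀ (k j : Int), j ∈ aliveIdx xs k →
    ∃ u w, xs = u ++ true :: w ∧ j = k + (u.length : Int) := by
  induction xs with
  | nil => intro k j hj; simp [aliveIdx] at hj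
  | cons b bs ih =>
    intro k j hj
    simp only [aliveIdx, List.mem_append] at hj
    rcases hj with hj | hj
    · rcases Bool.eq_false_or_eq_true b with hb | hb <;> simp [hb] at hj
      exact ⟨[], bs, by rw [hb]; rfl, by simpa using hj⟩
    · obtain ⟨u, w, hu, hju⟩ := ih (k + 1) j hj
      refine ⟨b :: u, w, by rw [hu]; rfl, ?_⟩
      rw [hju]
      simp only [List.length_cons]
      push_cast
      ring

lemma getD_mid (V1 : List Int) (x : Int) (V2 : List Int) :
    (V1 ++ x :: V2).getD V1.length 0 = x := by
  rw [List.getD_eq_getElem _ _ (by simp)]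
  rw [List.getElem_append_right le_rfl]
  simp

lemma eraseIdx_mid (V1 : List Int) (x : Int) (V2 : List Int) :
    (V1 ++ x :: V2).eraseIdx V1.length = V1 ++ V2 := by
  rw [List.eraseIdx_eq_take_drop_succ, List.take_left' rfl, List.drop_append]
  rw [List.drop_of_length_le (by omega)]
  rw [show V1.length + 1 - V1.length = 1 by omega]
  simp

lemma set_mid (u : List Bool) (c x : Bool) (w : List Bool) :
    (u ++ c :: w).set u.length x = u ++ x :: w := by
  induction u with
  | nil => rfl
  | cons a u ih => simp [List.set, ih]

-- the loop body of solve_alt, named for the proofs (identical term)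
def stepB (st : List Bool × List (Int × Int × Int)) (ij : Int × Int) :
    List Bool × List (Int × Int × Int) :=
  let pos : Int := ij.1 +
    (((PySem.List.slice st.1 none (some ij.2)).countP (fun b => b = true) : Nat) : Int)
  let res' := if pos ≠ ij.1 then st.2 ++ [(ij.1, pos, pos - ij.1)] else st.2
  (st.1.set ij.2.toNat false, res')

lemma solve_alt_eq_foldl (nums : List Int) (N : Int) :
    solve_alt nums N =
      ((PySem.List.enumerate (PySem.List.sorted2 (PySem.List.pyRange 0 N 1)
          (fun j => PySem.List.pyGetD nums j 0) (fun j => j)) 0).foldl stepB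
        (List.replicate N.toNat true, [])).2 := rfl

-- B's fold over the enumerated sorted order computes refRec on the alive values
lemma foldB_eq (nums : List Int) :
    ∀ (ord : List Int) (alive : List Bool) (res : List (Int × Int × Int)) (i : Int),
      ord.Perm (aliveIdx alive 0) →
      ord.Pairwise (ltIdx nums) →
      ((PySem.List.enumerate ord i).foldl stepB (alive, res)).2 =
        res ++ refRec ((aliveIdx alive 0).map (valAt nums)) i := by
  intro ord
  induction ord with
  | nil =>
    intro alive res i hperm _
    have hnil : aliveIdx alive 0 = [] := (List.Perm.nil_eq hperm).symm
    rw [hnil]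
    simp [PySem.List.enumerate, refRec]
  | cons j ord' ih =>
    intro alive res i hperm hpw
    have hjmem : j ∈ aliveIdx alive 0 := hperm.subset (List.mem_cons_self)
    obtain ⟨u, w, hsplit, hj⟩ := mem_aliveIdx_split alive 0 j hjmem
    have hj' : j = (u.length : Int) := by rw [hj]; ring
    have hIdx : aliveIdx alive 0 =
        aliveIdx u 0 ++ j :: aliveIdx w (j + 1) := by
      rw [hsplit, aliveIdx_append]
      simp only [aliveIdx, if_pos rfl]
      rw [show (0 : Int) + (u.length : Int) = j by omega]
      rfl
    set A1 : List Int := aliveIdx u 0 with hA1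
    set A2 : List Int := aliveIdx w (j + 1) with hA2
    set q : Nat := A1.length with hqdef
    -- all members of A1 are < j, members of the list are ≥ 0
    have hA1lt : ∀ x ∈ A1, x < j := by
      intro x hx
      have := aliveIdx_length_bound u 0 x hx
      omega
    -- the head j is the (value, index)-minimum; position q is the first value-minimum
    set vsAll : List Int := (aliveIdx alive 0).map (valAt nums) with hvs
    have hvsplit : vsAll = A1.map (valAt nums) ++ valAt nums j ::
        A2.map (valAt nums) := by
      rw [hvs, hIdx]
      simp
    obtain ⟨v0, vrest, hcons⟩ : ∃ v0 vrest, vsAll = v0 :: vrest := by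
      rw [hvsplit]
      cases h : A1.map (valAt nums) with
      | nil => exact ⟨_, _, rfl⟩
      | cons a l => exact ⟨_, _, rfl⟩
    have hq1len : (A1.map (valAt nums)).length = q := by simp [hqdef]
    have hqlt : q < vsAll.length := by
      rw [hvsplit]
      simp [hq1len]
    have hgetq : vsAll.getD q 0 = valAt nums j := by
      rw [hvsplit, ← hq1len, getD_mid]
    -- every entry of vsAll is a value of some index in ord
    have hmemOrd : ∀ x ∈ aliveIdx alive 0, x = j ∨ x ∈ ord' := by
      intro x hx
      have : x ∈ j :: ord' := hperm.symm.subset hx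
      simpa using this
    have hle : ∀ r : Nat, r < vsAll.length → valAt nums j ≤ vsAll.getD r 0 := by
      intro r hr
      have hmemv : vsAll.getD r 0 ∈ vsAll := by
        rw [List.getD_eq_getElem _ _ hr]
        exact List.getElem_mem hr
      rw [hvs] at hmemv
      obtain ⟨y, hy, hxy⟩ := List.mem_map.mp hmemv
      rw [← hxy]
      rcases hmemOrd _ hy with h | h
      · rw [h]
      · rcases (List.rel_of_pairwise_cons hpw) h with h1 | ⟨h1, _⟩
        · exact le_of_lt h1
        · exact le_of_eq h1
    have hfirst : ∀ l : Nat, l < q → vsAll.getD q 0 < vsAll.getD l 0 := by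
      intro l hl
      rw [hgetq]
      have hlA : l < (A1.map (valAt nums)).length := by rw [hq1len]; exact hl
      have hlA' : l < A1.length := by simpa using hlA
      have hgd : vsAll.getD l 0 = valAt nums (A1.getD l 0) := by
        rw [hvsplit, List.getD_append _ _ _ _ hlA, List.getD_eq_getElem _ _ hlA,
          List.getElem_map, List.getD_eq_getElem _ _ hlA']
      have hmemA1 : A1.getD l 0 ∈ A1 := by
        rw [List.getD_eq_getElem _ _ hlA']
        exact List.getElem_mem hlA'
      have hltj : A1.getD l 0 < j := hA1lt _ hmemA1
      have hmemI : A1.getD l 0 ∈ aliveIdx alive 0 := by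
        rw [hIdx]
        exact List.mem_append.mpr (Or.inl hmemA1)
      rcases hmemOrd _ hmemI with h | h
      · omega
      · rcases (List.rel_of_pairwise_cons hpw) h with h1 | ⟨_, h2⟩
        · rw [hgd]; exact h1
        · omega
    -- hence refRec picks position q
    have hp : fmPos v0 vrest = q := by
      apply fmPos_unique
      · rw [← hcons]; exact hqlt
      · intro r hr
        rw [← hcons] at hr ⊢
        rw [hgetq]
        exact hle r hr
      · intro l hl
        rw [← hcons]
        exact hfirst l hl
    -- B computes position i + q
    have hjnn : 0 ≤ j := by
      have := aliveIdx_length_bound alive 0 j hjmem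
      omega
    have hcount : (PySem.List.slice alive none (some j)).countP (fun b => b = true)
        = q := by
      rw [PySem.List.slice_to _ hjnn]
      have htk : List.take j.toNat alive = u := by
        rw [hsplit, show j.toNat = u.length by omega, List.take_left' rfl]
      rw [htk, hqdef, hA1]
      exact countTrue_eq_aliveIdx_length u 0
    have hset : aliveIdx (alive.set j.toNat false) 0 = A1 ++ A2 := by
      rw [hsplit, show j.toNat = u.length by omega, set_mid, aliveIdx_append]
      simp only [aliveIdx, Bool.false_eq_true, if_false, List.nil_append]
      rw [show (0 : Int) + (u.length : Int) = j by omega]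
    -- unfold one step of the fold
    rw [PySem.List.enumerate_cons, List.foldl_cons]
    have hstep : stepB (alive, res) (i, j) =
        (alive.set j.toNat false,
          if (q : Nat) ≠ 0 then res ++ [(i, i + (q : Int), (q : Int))] else res) := by
      simp only [stepB, hcount]
      congr 1
      by_cases hq0 : q = 0
      · rw [if_neg (by simp [hq0]), if_neg (by simp [hq0])]
      · rw [if_pos (by intro h; apply hq0; omega), if_pos hq0]
        congr 2
        ring_nf
    rw [hstep]
    have hperm' : ord'.Perm (aliveIdx (alive.set j.toNat false) 0) := by
      rw [hset]
      have h1 : (j :: ord').Perm (A1 ++ j :: A2) := by rw [← hIdx]; exact hperm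
      have h2 : (A1 ++ j :: A2).Perm (j :: (A1 ++ A2)) := List.perm_middle
      exact (List.perm_cons j).mp (h1.trans h2)
    rw [ih (alive.set j.toNat false)
      (if (q : Nat) ≠ 0 then res ++ [(i, i + (q : Int), (q : Int))] else res)
      (i + 1) hperm' (List.Pairwise.of_cons hpw)]
    -- fold the reference one step
    conv_rhs => rw [hcons, refRec]
    rw [hp]
    have herase : ((v0 :: vrest).eraseIdx q) =
        (aliveIdx (alive.set j.toNat false) 0).map (valAt nums) := by
      rw [← hcons, hvsplit, ← hq1len, eraseIdx_mid, hset]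
      simp
    rw [herase]
    by_cases hq0 : q = 0
    · rw [if_neg (by simpa using hq0), if_pos hq0]
      simp
    · rw [if_pos (by simpa using hq0), if_neg hq0]
      simp

-- sorted2 with our keys is an insertion-sort fold (definitional)
lemma sorted2_eq_foldl (nums : List Int) (xs : List Int) :
    PySem.List.sorted2 xs (fun j => PySem.List.pyGetD nums j 0) (fun j => j) =
      xs.foldl (fun acc x => PySem.List.insertBy (bfB nums) x acc) [] := rfl

lemma bfB_asym (nums : List Int) (a b : Int) (h : bfB nums a b = true) :
    bfB nums b a = false := by
  simp only [bfB, Bool.or_eq_true, Bool.and_eq_true, Bool.not_eq_true',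
    decide_eq_true_eq, decide_eq_false_iff_not, Bool.or_eq_false_iff,
    Bool.and_eq_false_iff, Bool.not_eq_false'] at h ⊢
  omega

lemma bfB_trans' (nums : List Int) (x y z : Int) (h1 : bfB nums z y = false)
    (h2 : bfB nums x y = true) : bfB nums z x = false := by
  simp only [bfB, Bool.or_eq_true, Bool.and_eq_true, Bool.not_eq_true',
    decide_eq_true_eq, decide_eq_false_iff_not, Bool.or_eq_false_iff,
    Bool.and_eq_false_iff, Bool.not_eq_false'] at h1 h2 ⊢
  omega

lemma insertBy_pairwise_bfB (nums : List Int) (x : Int) :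
    ∀ (acc : List Int), acc.Pairwise (fun a b => bfB nums b a = false) →
      (PySem.List.insertBy (bfB nums) x acc).Pairwise
        (fun a b => bfB nums b a = false) := by
  intro acc
  induction acc with
  | nil => intro _; simp [PySem.List.insertBy]
  | cons y ys ih =>
    intro h
    rw [PySem.List.insertBy]
    by_cases hxy : bfB nums x y = true
    · rw [if_pos hxy]
      refine List.Pairwise.cons ?_ h
      intro z hz
      rcases List.mem_cons.mp hz with hz | hz
      · rw [hz]; exact bfB_asym nums x y hxy
      · exact bfB_trans' nums x y z ((List.rel_of_pairwise_cons h) hz) hxy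
    · rw [if_neg hxy]
      refine List.Pairwise.cons ?_ (ih (List.Pairwise.of_cons h))
      intro z hz
      rcases (PySem.List.insertBy_mem_iff _ _ _ _).mp hz with hz | hz
      · rw [hz]
        simpa using hxy
      · exact (List.rel_of_pairwise_cons h) hz

lemma foldl_insertBy_pairwise_bfB (nums : List Int) :
    ∀ (xs acc : List Int), acc.Pairwise (fun a b => bfB nums b a = false) →
      (xs.foldl (fun acc x => PySem.List.insertBy (bfB nums) x acc) acc).Pairwise
        (fun a b => bfB nums b a = false) := by
  intro xs
  induction xs with
  | nil => intro acc h; exact h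
  | cons x xs ih =>
    intro acc h
    rw [List.foldl_cons]
    exact ih _ (insertBy_pairwise_bfB nums x acc h)

lemma sorted2_pairwise_ltIdx (nums : List Int) (N : Int) :
    (PySem.List.sorted2 (PySem.List.pyRange 0 N 1)
      (fun j => PySem.List.pyGetD nums j 0) (fun j => j)).Pairwise (ltIdx nums) := by
  have hpw := foldl_insertBy_pairwise_bfB nums (PySem.List.pyRange 0 N 1) []
    (List.Pairwise.nil)
  rw [← sorted2_eq_foldl] at hpw
  have hnd : (PySem.List.sorted2 (PySem.List.pyRange 0 N 1)
      (fun j => PySem.List.pyGetD nums j 0) (fun j => j)).Nodup :=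
    (PySem.List.sorted2_perm _ _ _ _).nodup_iff.mpr
      (PySem.List.nodup_pyRange_one 0 N)
  have hcomb := List.Pairwise.and hpw hnd
  refine hcomb.imp ?_
  intro a b hab
  obtain ⟨h1, h2⟩ := hab
  simp only [bfB, Bool.or_eq_false_iff, Bool.and_eq_false_iff, Bool.not_eq_false',
    decide_eq_true_eq, decide_eq_false_iff_not] at h1
  unfold ltIdx
  have hne : a ≠ b := h2
  rcases h1 with ⟨h1a, h1b⟩
  by_cases hv : valAt nums a < valAt nums b
  · left; exact hv
  · right
    constructor
    · omega
    · rcases h1b with h | h <;> omega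

lemma aliveIdx_replicate (n : Nat) : ∀ k : Int,
    aliveIdx (List.replicate n true) k = PySem.List.pyRange k (k + (n : Int)) 1 := by
  induction n with
  | zero => intro k; simp [aliveIdx, PySem.List.pyRange_one_eq_nil]
  | succ n ih =>
    intro k
    rw [List.replicate_succ]
    simp only [aliveIdx]
    rw [if_pos trivial, List.singleton_append, ih (k + 1)]
    rw [show (k + 1) + (n : Int) = k + ((n + 1 : Nat) : Int) by push_cast; ring]
    rw [← PySem.List.pyRange_one_cons (by push_cast; omega)]

lemma map_val_take (nums : List Int) (N : Int) (h0 : 0 ≤ N)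
    (hN : N ≤ (nums.length : Int)) :
    (PySem.List.pyRange 0 N 1).map (valAt nums) = nums.take N.toNat := by
  apply List.ext_getElem
  · rw [List.length_map, PySem.List.length_pyRange_one, List.length_take]
    omega
  · intro t h1 h2
    rw [List.getElem_map, PySem.List.getElem_pyRange_one, List.getElem_take]
    have ht : t < N.toNat := by
      rw [List.length_take] at h2; omega
    rw [valAt, PySem.List.pyGetD_eq_getElem _ 0 (by omega) (by push_cast; omega)]
    congr 1
    omega

lemma solveB_eq_ref (nums : List Int) (N : Int) (h0 : 0 ≤ N)
    (hN : N ≤ (nums.length : Int)) :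
    solve_alt nums N = refRec (nums.take N.toNat) 0 := by
  rw [solve_alt_eq_foldl]
  have hrep : aliveIdx (List.replicate N.toNat true) 0 = PySem.List.pyRange 0 N 1 := by
    rw [aliveIdx_replicate N.toNat 0]
    congr 1
    omega
  have hperm : (PySem.List.sorted2 (PySem.List.pyRange 0 N 1)
      (fun j => PySem.List.pyGetD nums j 0) (fun j => j)).Perm
      (aliveIdx (List.replicate N.toNat true) 0) := by
    rw [hrep]
    exact PySem.List.sorted2_perm _ _ _ _
  rw [foldB_eq nums _ _ [] 0 hperm (sorted2_pairwise_ltIdx nums N)]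
  rw [hrep, map_val_take nums N h0 hN]
  simp

theorem solve_spec : Claim_equal_solve := by
  intro nums N _ hPre
  unfold Spec_solve
  by_cases h0 : 0 ≤ N
  · rw [solveA_eq_ref nums N h0 hPre, solveB_eq_ref nums N h0 hPre]
  · rw [solve, solveOuterA, dif_neg (by omega)]
    rw [solve_alt_eq_foldl, PySem.List.pyRange_one_eq_nil (by omega)]
    rfl
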